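-- pv_equiv track=rewrite | github.com/qazi112/Lexical-Analyzer-Using-Python | CC_LX/modules/punctuations.py | result
-- ===== SOURCE A (Python) =====
-- def start(c):
--     dfa = 0
--     if c == "." or c == "(" or c == ")" or c == "{" or c == "}":
--         dfa = 1
--     else:
--         dfa = 2
--
--     return dfa
--
-- def state1(c):
--     if len(c)!= 0:
--         dfa = 2
--     else:
--         dfa = -1
--     return dfa
--
-- def state2(c):
--     return -1
--
-- def result(lexeme):
--     dfa = 0
--     l = len(lexeme)
--     for x in range(l):
--         if dfa == 0:
--
--             dfa = start(lexeme[x])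
--         elif dfa == 1:
--
--             dfa = state1(lexeme[x])
--         elif dfa == 2:
--
--             dfa = state2(lexeme[x])
--         else:
--             dfa = 0
--
--     if dfa == 1:
--         return 1
--     else:
--         return 0
-- ===== SOURCE B (Python) =====
-- def result(lexeme):
--     # Block-skipping scan: each DFA "round" starting at state 0 consumes
--     # 4 chars after a punctuation char (0->1->2->-1->0) or 3 after any
--     # other char (0->2->-1->0); the answer is 1 iff a round starts at the
--     # last position with a punctuation char.
--     l = len(lexeme)
--     i = 0
--     while i < l:
--         if lexeme[i] in ".(){}":
--             if i == l - 1: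
--                 return 1
--             i += 4
--         else:
--             i += 3
--     return 0
-- ===== Notes on version B (the rewrite author's own statement) =====
-- stated objective: faster
-- what changed: Replaced the per-character DFA state machine with an index-jumping scan that skips 4 positions after a punctuation char and 3 after any other (one DFA round per jump), returning 1 exactly when a round starts with a punctuation char at the last position.
import Mathlib
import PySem

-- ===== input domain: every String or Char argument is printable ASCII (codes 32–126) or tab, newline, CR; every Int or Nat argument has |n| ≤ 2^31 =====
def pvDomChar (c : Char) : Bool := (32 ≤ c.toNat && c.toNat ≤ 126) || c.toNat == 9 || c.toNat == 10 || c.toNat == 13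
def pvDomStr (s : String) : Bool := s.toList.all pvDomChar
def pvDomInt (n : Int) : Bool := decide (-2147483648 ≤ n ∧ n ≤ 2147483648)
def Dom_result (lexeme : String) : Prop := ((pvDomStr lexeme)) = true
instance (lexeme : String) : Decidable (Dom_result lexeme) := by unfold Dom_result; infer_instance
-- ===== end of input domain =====

-- B replaces A's per-character DFA loop by an index-jumping scan (3/4 positions per DFA round); return value only, no side effects.

-- ===== PORT A =====
-- start(c): c is always a 1-character string in A; ported as Char
def startA (c : Char) : Int :=
  if c = '.' ∨ c = '(' ∨ c = ')' ∨ c = '{' ∨ c = '}' then 1 else 2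

-- state1(c): len(c) != 0 — c is the 1-character string lexeme[x], ported as the singleton list [c]
def state1A (c : Char) : Int :=
  if ([c] : List Char).length ≠ 0 then 2 else -1

def state2A (_c : Char) : Int := -1

-- the `for x in range(l)` loop over the characters, threading dfa
def resultLoop : Int → List Char → Int
  | dfa, [] => dfa
  | dfa, c :: cs =>
      resultLoop
        (if dfa = 0 then startA c
         else if dfa = 1 then state1A c
         else if dfa = 2 then state2A c
         else 0) cs

def result (lexeme : String) : Int :=
  if resultLoop 0 lexeme.toList = 1 then 1 else 0

-- ===== PORT B =====
-- `lexeme[i] in ".(){}"` ported as membership in that string's character list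
def altLoop (cl : List Char) (l i : Nat) : Int :=
  if i < l then
    if cl.getD i ' ' ∈ ['.', '(', ')', '{', '}'] then
      if i = l - 1 then 1 else altLoop cl l (i + 4)
    else altLoop cl l (i + 3)
  else 0
termination_by l - i
decreasing_by all_goals omega

def result_alt (lexeme : String) : Int :=
  altLoop lexeme.toList lexeme.toList.length 0

-- ===== PRECONDITION & SPEC =====
def Spec_result (lexeme : String) (out : Int) : Prop := out = result_alt lexeme
instance (lexeme : String) (out : Int) : Decidable (Spec_result lexeme out) := by unfold Spec_result; infer_instance

-- ===== CLAIM (what is proved, stated in full; the proofs are below) =====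
def Claim_equal_result : Prop := ∀ (lexeme : String), Dom_result lexeme → Spec_result lexeme (result lexeme)

-- ===== LEMMAS AND PROOFS =====

theorem loop2_eq (xs : List Char) :
    (if resultLoop 2 xs = 1 then (1:Int) else 0)
      = (if resultLoop 0 (xs.drop 2) = 1 then (1:Int) else 0) := by
  match xs with
  | [] => simp [resultLoop]
  | [e] => simp [resultLoop, state2A]
  | e :: f :: fs => simp [resultLoop, state2A]

theorem loop1_eq (xs : List Char) :
    (if resultLoop 1 xs = 1 then (1:Int) else 0)
      = (if xs = [] then (1:Int)
         else if resultLoop 0 (xs.drop 3) = 1 then (1:Int) else 0) := by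
  match xs with
  | [] => simp [resultLoop]
  | d :: ds =>
      have h2 := loop2_eq ds
      simp only [resultLoop, state1A]
      simpa using h2

theorem key (cl : List Char) (i : Nat) :
    (if resultLoop 0 (cl.drop i) = 1 then (1:Int) else 0) = altLoop cl cl.length i := by
  by_cases h : i < cl.length
  · have hdrop : cl.drop i = cl[i] :: cl.drop (i + 1) := List.drop_eq_getElem_cons h
    have hget : cl.getD i ' ' = cl[i] := List.getD_eq_getElem cl ' ' h
    by_cases hp : cl[i] = '.' ∨ cl[i] = '(' ∨ cl[i] = ')' ∨ cl[i] = '{' ∨ cl[i] = '}'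
    · have hmem : cl[i] ∈ (['.', '(', ')', '{', '}'] : List Char) := by simpa using hp
      have hstart : startA cl[i] = 1 := by simp [startA, hp]
      rw [altLoop, if_pos h, hget, if_pos hmem, hdrop]
      have hL : resultLoop 0 (cl[i] :: cl.drop (i + 1)) = resultLoop 1 (cl.drop (i + 1)) := by
        simp [resultLoop, hstart]
      rw [hL, loop1_eq]
      by_cases hlast : i = cl.length - 1
      · have hnil : cl.drop (i + 1) = [] := List.drop_eq_nil_of_le (by omega)
        rw [if_pos hlast, if_pos hnil]
      · have hne : cl.drop (i + 1) ≠ [] := by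
          have : i + 1 < cl.length := by omega
          simp [List.drop_eq_nil_iff]; omega
        have hdd : (cl.drop (i + 1)).drop 3 = cl.drop (i + 4) := by
          rw [List.drop_drop]
        rw [if_neg hne, if_neg hlast, hdd]
        exact key cl (i + 4)
    · have hmem : cl[i] ∉ (['.', '(', ')', '{', '}'] : List Char) := by simpa using hp
      have hstart : startA cl[i] = 2 := by simp [startA, hp]
      rw [altLoop, if_pos h, hget, if_neg hmem, hdrop]
      have hL : resultLoop 0 (cl[i] :: cl.drop (i + 1)) = resultLoop 2 (cl.drop (i + 1)) := by
        simp [resultLoop, hstart]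
      have hdd : (cl.drop (i + 1)).drop 2 = cl.drop (i + 3) := by
        rw [List.drop_drop]
      rw [hL, loop2_eq, hdd]
      exact key cl (i + 3)
  · rw [altLoop, if_neg h]
    rw [List.drop_eq_nil_of_le (by omega)]
    simp [resultLoop]
termination_by cl.length - i
decreasing_by all_goals omega

-- ===== VERDICT (by name: the statement is the Claim_ definition above) =====
theorem result_spec : Claim_equal_result := by
  intro lexeme _
  unfold Spec_result result result_alt
  simpa using key lexeme.toList 0
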